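-- pv_equiv track=rewrite | github.com/michelleduong03/Practice | Epic.py | simulate_patients
-- ===== SOURCE A (Python) =====
-- def simulate_patients(arrivals: list[tuple[int,int,int]], t: int) -> dict:
--     # Sort arrivals by arrival_time (just in case)
--     arrivals.sort(key=lambda x: x[0])
--
--     time = 0                     # current time
--     i = 0                        # index for arrivals
--     n = len(arrivals)
--     waiting = []                # waiting patients: (severity, arrival_time, id)
--     result = {}                 # patient_id -> start_time
--
--     while i < n or waiting:
--         # Add all patients who arrive at this time
--         while i < n and arrivals[i][0] <= time:
--             arr_time, pid, sev = arrivals[i]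
--             waiting.append((sev, arr_time, pid))
--             i += 1
--
--         if waiting:
--             # Choose highest severity, tie → earliest arrival
--             waiting.sort(key=lambda x: (-x[0], x[1]))
--             sev, arr_time, pid = waiting.pop(0)
--
--             # Start treatment now
--             result[pid] = time
--
--             # Doctor busy for t minutes
--             time += t
--         else:
--             # If no one waiting, jump directly to next arrival time
--             time = arrivals[i][0]
--
--     return result
-- ===== SOURCE B (Python) =====
-- def _extract(w):
--     # one left-to-right scan: keep (pre, best, post) with pre + [best] + post the
--     # scanned patients in order and best the first one with maximal (severity, -arrival)
--     pre, best, post = [], w[0], []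
--     for p in w[1:]:
--         if (p[0], -p[1]) > (best[0], -best[1]):
--             pre = pre + [best] + post
--             best = p
--             post = []
--         else:
--             post.append(p)
--     return best, pre + post
--
-- def simulate_patients(arrivals: list[tuple[int,int,int]], t: int) -> dict:
--     arrivals.sort(key=lambda x: x[0])
--
--     pending = list(arrivals)     # consumed from the front instead of indexing
--     waiting = []                 # unordered queue in insertion order
--     result = {}
--     time = 0
--
--     while pending or waiting:
--         while pending and pending[0][0] <= time:
--             arr_time, pid, sev = pending.pop(0)
--             waiting.append((sev, arr_time, pid))
--
--         if waiting:
--             (sev, arr_time, pid), waiting = _extract(waiting)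
--             result[pid] = time
--             time += t
--         else:
--             time = pending[0][0]
--
--     return result
-- ===== Notes on version B (the rewrite author's own statement) =====
-- stated objective: alternative
-- what changed: B consumes the sorted arrivals from the front of a pending list and, instead of re-sorting the whole waiting queue before every treatment, selects the next patient with a single linear scan that splits the queue around its first maximal (severity, -arrival) element.
import Mathlib
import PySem

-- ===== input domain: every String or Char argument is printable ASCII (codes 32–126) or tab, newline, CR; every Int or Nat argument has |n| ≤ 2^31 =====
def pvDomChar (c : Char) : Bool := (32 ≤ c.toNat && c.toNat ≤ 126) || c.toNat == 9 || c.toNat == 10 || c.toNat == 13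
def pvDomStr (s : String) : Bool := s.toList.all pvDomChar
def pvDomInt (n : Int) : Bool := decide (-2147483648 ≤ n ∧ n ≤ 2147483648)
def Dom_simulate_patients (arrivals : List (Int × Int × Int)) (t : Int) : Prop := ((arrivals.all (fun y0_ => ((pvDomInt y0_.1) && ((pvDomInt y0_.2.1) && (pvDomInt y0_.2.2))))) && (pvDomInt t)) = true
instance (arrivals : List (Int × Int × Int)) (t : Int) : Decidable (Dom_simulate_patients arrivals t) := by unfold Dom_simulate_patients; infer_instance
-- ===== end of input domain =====

-- B consumes the sorted arrivals from the front of a pending list and, instead of re-sorting the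
-- waiting queue before every treatment, picks the next patient by one linear scan that splits the
-- queue around its first maximal (severity, -arrival) element; return-value equivalence only
-- (both A and B sort the `arrivals` argument in place, as the original does).


-- ===== PORT A =====

-- inner `while i < n and arrivals[i][0] <= time` of A: appends (sev, arr_time, pid) to `waiting`;
-- the first Nat argument is fuel making the recursion structural (`arrivals.length - i` never runs out,
-- since i increases by 1 per step)
def pvAddA (arrivals : List (Int × Int × Int)) (time : Int) :
    Nat → Nat → List (Int × Int × Int) → Nat × List (Int × Int × Int)
  | 0, i, w => (i, w)
  | k + 1, i, w =>
    if h : i < arrivals.length then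
      let a := arrivals[i]
      if a.1 ≤ time then pvAddA arrivals time k (i + 1) (w ++ [(a.2.2, a.1, a.2.1)])
      else (i, w)
    else (i, w)

-- outer `while i < n or waiting` of A; fuel bounds the iteration count (≤ 2n+1 suffices)
def pvLoopA (arrivals : List (Int × Int × Int)) (t : Int) :
    Nat → Nat → Int → List (Int × Int × Int) → PySem.Dict Int Int → PySem.Dict Int Int
  | 0, _, _, _, res => res
  | f + 1, i, time, w, res =>
    if i < arrivals.length ∨ w ≠ [] then
      let p := pvAddA arrivals time (arrivals.length - i) i w
      -- `waiting.sort(key=lambda x: (-x[0], x[1])); waiting.pop(0)` (sorting [] is [])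
      match PySem.List.sorted2 p.2 (fun x => -x.1) (fun x => x.2.1) with
      | (_, _, pid) :: rest => pvLoopA arrivals t f p.1 (time + t) rest (res.insert pid time)
      | [] =>
        match arrivals[p.1]? with   -- `time = arrivals[i][0]` (index is in range whenever reached)
        | some a => pvLoopA arrivals t f p.1 a.1 p.2 res
        | none => res
    else res

def simulate_patients (arrivals : List (Int × Int × Int)) (t : Int) : List (Int × Int) :=
  let arr := PySem.List.sorted arrivals (fun x => x.1)
  (pvLoopA arr t (2 * arr.length + 1) 0 0 [] PySem.Dict.empty).items

-- ===== PORT B =====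

-- Python's `(p[0], -p[1]) > (best[0], -best[1])` on waiting entries (sev, arr, pid)
def pvGtB (p b : Int × Int × Int) : Bool :=
  decide (b.1 < p.1) || (decide (p.1 = b.1) && decide (p.2.1 < b.2.1))

-- one step of _extract's scan: state (pre, best, post), pre ++ [best] ++ post = patients seen so far
def pvStepB (s : List (Int × Int × Int) × (Int × Int × Int) × List (Int × Int × Int))
    (p : Int × Int × Int) :
    List (Int × Int × Int) × (Int × Int × Int) × List (Int × Int × Int) :=
  if pvGtB p s.2.1 then (s.1 ++ s.2.1 :: s.2.2, p, []) else (s.1, s.2.1, s.2.2 ++ [p])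

-- `_extract(w)` for w = x :: xs: first maximal patient and the rest of the queue in order
def pvExtractB (x : Int × Int × Int) (xs : List (Int × Int × Int)) :
    (Int × Int × Int) × List (Int × Int × Int) :=
  let s := xs.foldl pvStepB ([], x, [])
  (s.2.1, s.1 ++ s.2.2)

-- B's inner arrival loop: `pending.pop(0)`s while the front has arrived, appending to `waiting`
def pvAddB (time : Int) :
    List (Int × Int × Int) → List (Int × Int × Int) →
    List (Int × Int × Int) × List (Int × Int × Int)
  | [], w => ([], w)
  | a :: ps, w =>
    if a.1 ≤ time then pvAddB time ps (w ++ [(a.2.2, a.1, a.2.1)])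
    else (a :: ps, w)

-- B's outer `while pending or waiting`; same fuel bound as A's loop
def pvLoopB (t : Int) :
    Nat → List (Int × Int × Int) → Int → List (Int × Int × Int) →
    PySem.Dict Int Int → PySem.Dict Int Int
  | 0, _, _, _, res => res
  | f + 1, pending, time, w, res =>
    if pending ≠ [] ∨ w ≠ [] then
      let q := pvAddB time pending w
      match q.2 with
      | x :: xs =>
        let e := pvExtractB x xs
        pvLoopB t f q.1 (time + t) e.2 (res.insert e.1.2.2 time)
      | [] =>
        match q.1 with                 -- `time = pending[0][0]` (pending nonempty whenever reached)
        | a :: _ => pvLoopB t f q.1 a.1 q.2 res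
        | [] => res
    else res

def simulate_patients_alt (arrivals : List (Int × Int × Int)) (t : Int) : List (Int × Int) :=
  let arr := PySem.List.sorted arrivals (fun x => x.1)
  (pvLoopB t (2 * arr.length + 1) arr 0 [] PySem.Dict.empty).items

-- ===== PRECONDITION & SPEC =====
def Spec_simulate_patients (arrivals : List (Int × Int × Int)) (t : Int) (out : List (Int × Int)) : Prop := out = simulate_patients_alt arrivals t
instance (arrivals : List (Int × Int × Int)) (t : Int) (out : List (Int × Int)) : Decidable (Spec_simulate_patients arrivals t out) := by unfold Spec_simulate_patients; infer_instance

-- ===== CLAIM (what is proved, stated in full; the proofs are below) =====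
def Claim_equal_simulate_patients : Prop := ∀ (arrivals : List (Int × Int × Int)) (t : Int), Dom_simulate_patients arrivals t → Spec_simulate_patients arrivals t (simulate_patients arrivals t)

-- ===== LEMMAS AND PROOFS =====

-- the comparison A's `waiting.sort(key=lambda x: (-x[0], x[1]))` uses
def pvLt (a b : Int × Int × Int) : Bool :=
  decide (-a.1 < -b.1) || (!decide (-b.1 < -a.1) && decide (a.2.1 < b.2.1))

-- A's sort, as the insertion fold it is defined to be
def pvSortK (w : List (Int × Int × Int)) : List (Int × Int × Int) :=
  w.foldl (fun acc x => PySem.List.insertBy pvLt x acc) []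

lemma pvSorted2_eq (w : List (Int × Int × Int)) :
    PySem.List.sorted2 w (fun x => -x.1) (fun x => x.2.1) = pvSortK w := rfl

lemma pvLt_iff (a b : Int × Int × Int) :
    pvLt a b = true ↔ (b.1 < a.1 ∨ (b.1 ≤ a.1 ∧ a.2.1 < b.2.1)) := by
  simp only [pvLt, Bool.or_eq_true, Bool.and_eq_true, Bool.not_eq_true', decide_eq_true_eq,
    decide_eq_false_iff_not]
  omega

lemma pvGtB_eq_pvLt (p b : Int × Int × Int) : pvGtB p b = pvLt p b := by
  rw [Bool.eq_iff_iff, pvLt_iff]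
  simp [pvGtB]; omega

lemma pvLt_asymm {a b : Int × Int × Int} (h : pvLt a b = true) : pvLt b a = false := by
  rw [pvLt_iff] at h
  rw [Bool.eq_false_iff, Ne, pvLt_iff]; omega

lemma pvLt_trans {a b c : Int × Int × Int} (h1 : pvLt a b = true) (h2 : pvLt b c = true) :
    pvLt a c = true := by
  rw [pvLt_iff] at *; omega

lemma pvLt_true_of_true_of_false {a b c : Int × Int × Int}
    (h1 : pvLt a b = true) (h2 : pvLt c b = false) : pvLt a c = true := by
  rw [Bool.eq_false_iff, Ne, pvLt_iff] at h2
  rw [pvLt_iff] at *; omega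

lemma pvLt_false_of_true_of_false {a b c : Int × Int × Int}
    (h1 : pvLt a b = true) (h2 : pvLt c b = false) : pvLt c a = false :=
  pvLt_asymm (pvLt_true_of_true_of_false h1 h2)

lemma pvSortK_perm (w : List (Int × Int × Int)) : (pvSortK w).Perm w := by
  rw [← pvSorted2_eq]
  exact PySem.List.sorted2_perm ..

lemma pvSortK_length (w : List (Int × Int × Int)) : (pvSortK w).length = w.length :=
  (pvSortK_perm w).length_eq

lemma pvSortK_append (w l : List (Int × Int × Int)) :
    pvSortK (w ++ l) = l.foldl (fun acc x => PySem.List.insertBy pvLt x acc) (pvSortK w) := by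
  simp [pvSortK, List.foldl_append]

lemma pvSortK_congr_append {w1 w2 : List (Int × Int × Int)} (l : List (Int × Int × Int))
    (h : pvSortK w1 = pvSortK w2) : pvSortK (w1 ++ l) = pvSortK (w2 ++ l) := by
  rw [pvSortK_append, pvSortK_append, h]

lemma pvInsert_pairwise (x : Int × Int × Int) (acc : List (Int × Int × Int))
    (h : acc.Pairwise (fun a b => pvLt b a = false)) :
    (PySem.List.insertBy pvLt x acc).Pairwise (fun a b => pvLt b a = false) := by
  induction acc with
  | nil => simp [PySem.List.insertBy]
  | cons y ys ih =>
    rcases List.pairwise_cons.mp h with ⟨hy, hys⟩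
    cases hxy : pvLt x y with
    | true =>
      simp only [PySem.List.insertBy, hxy, if_true]
      refine List.pairwise_cons.mpr ⟨?_, h⟩
      intro z hz
      rcases List.mem_cons.mp hz with rfl | hz'
      · exact pvLt_asymm hxy
      · exact pvLt_false_of_true_of_false hxy (hy z hz')
    | false =>
      simp only [PySem.List.insertBy, hxy, Bool.false_eq_true, if_false]
      refine List.pairwise_cons.mpr ⟨?_, ih hys⟩
      intro z hz
      rcases (PySem.List.mem_insertBy ..).mp hz with rfl | hz'
      · exact hxy
      · exact hy z hz'

lemma pvFoldl_pairwise (l : List (Int × Int × Int)) :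
    ∀ acc : List (Int × Int × Int), acc.Pairwise (fun a b => pvLt b a = false) →
      (l.foldl (fun acc x => PySem.List.insertBy pvLt x acc) acc).Pairwise
        (fun a b => pvLt b a = false) := by
  induction l with
  | nil => intro acc h; exact h
  | cons x xs ih => intro acc h; exact ih _ (pvInsert_pairwise x acc h)

lemma pvSortK_pairwise (w : List (Int × Int × Int)) :
    (pvSortK w).Pairwise (fun a b => pvLt b a = false) :=
  pvFoldl_pairwise w [] (by simp)

lemma pvSortK_eq_self (s : List (Int × Int × Int))
    (h : s.Pairwise (fun a b => pvLt b a = false)) : pvSortK s = s := by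
  induction s using List.reverseRecOn with
  | nil => rfl
  | append_singleton ys y ih =>
    have hpair := List.pairwise_append.mp h
    rw [pvSortK_append, List.foldl_cons, List.foldl_nil, ih hpair.1]
    refine PySem.List.insertBy_of_forall_not_before _ _ _ ?_
    intro z hz
    exact hpair.2.2 z hz y (by simp)

lemma pvSortK_idem (w : List (Int × Int × Int)) : pvSortK (pvSortK w) = pvSortK w :=
  pvSortK_eq_self _ (pvSortK_pairwise w)

lemma pvInsert_front (m : Int × Int × Int) (acc : List (Int × Int × Int))
    (h : ∀ y ∈ acc, pvLt m y = true) : PySem.List.insertBy pvLt m acc = m :: acc := by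
  cases acc with
  | nil => rfl
  | cons y ys => simp [PySem.List.insertBy, h y (by simp)]

lemma pvFoldl_cons_head (Q : List (Int × Int × Int)) :
    ∀ (acc : List (Int × Int × Int)) (m : Int × Int × Int),
      (∀ y ∈ Q, pvLt y m = false) →
      Q.foldl (fun acc x => PySem.List.insertBy pvLt x acc) (m :: acc) =
        m :: Q.foldl (fun acc x => PySem.List.insertBy pvLt x acc) acc := by
  induction Q with
  | nil => intro acc m _; rfl
  | cons y ys ih =>
    intro acc m h
    have hy : pvLt y m = false := h y (by simp)
    simp only [List.foldl_cons, PySem.List.insertBy, hy, Bool.false_eq_true, if_false]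
    exact ih _ m (fun z hz => h z (by simp [hz]))

-- the head of A's sorted waiting list is the first minimal element; the tail sorts the rest
lemma pvPop_sortK (P Q : List (Int × Int × Int)) (m : Int × Int × Int)
    (hP : ∀ y ∈ P, pvLt m y = true) (hQ : ∀ y ∈ Q, pvLt y m = false) :
    pvSortK (P ++ m :: Q) = m :: pvSortK (P ++ Q) := by
  have hmem : ∀ y ∈ pvSortK P, pvLt m y = true := fun y hy => hP y ((pvSortK_perm P).mem_iff.mp hy)
  rw [show P ++ m :: Q = (P ++ [m]) ++ Q by simp, pvSortK_append,
    pvSortK_append P [m], List.foldl_cons, List.foldl_nil, pvInsert_front m _ hmem,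
    pvFoldl_cons_head Q _ m hQ, ← pvSortK_append]

-- invariant of _extract's scan: pre ++ [best] ++ post is the scanned input in order,
-- best strictly beats pre and is not beaten by post
lemma pvSel_inv (l : List (Int × Int × Int)) :
    ∀ (P Q : List (Int × Int × Int)) (m : Int × Int × Int),
      (∀ y ∈ P, pvLt m y = true) → (∀ y ∈ Q, pvLt y m = false) →
      (∀ y ∈ (l.foldl pvStepB (P, m, Q)).1, pvLt (l.foldl pvStepB (P, m, Q)).2.1 y = true) ∧
      (∀ y ∈ (l.foldl pvStepB (P, m, Q)).2.2, pvLt y (l.foldl pvStepB (P, m, Q)).2.1 = false) ∧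
      (l.foldl pvStepB (P, m, Q)).1 ++ (l.foldl pvStepB (P, m, Q)).2.1 ::
        (l.foldl pvStepB (P, m, Q)).2.2 = P ++ m :: Q ++ l := by
  induction l with
  | nil => intro P Q m hP hQ; exact ⟨hP, hQ, by simp⟩
  | cons p ps ih =>
    intro P Q m hP hQ
    cases hpm : pvLt p m with
    | true =>
      simp only [List.foldl_cons, pvStepB, pvGtB_eq_pvLt, hpm, if_true]
      have h1 : ∀ y ∈ P ++ m :: Q, pvLt p y = true := by
        intro y hy
        rcases List.mem_append.mp hy with hy' | hy'
        · exact pvLt_trans hpm (hP y hy')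
        · rcases List.mem_cons.mp hy' with rfl | hy''
          · exact hpm
          · exact pvLt_true_of_true_of_false hpm (hQ y hy'')
      obtain ⟨c1, c2, c3⟩ := ih (P ++ m :: Q) [] p h1 (by simp)
      exact ⟨c1, c2, by rw [c3]; simp⟩
    | false =>
      simp only [List.foldl_cons, pvStepB, pvGtB_eq_pvLt, hpm, Bool.false_eq_true, if_false]
      have h2 : ∀ y ∈ Q ++ [p], pvLt y m = false := by
        intro y hy
        rcases List.mem_append.mp hy with hy' | hy'
        · exact hQ y hy'
        · simp only [List.mem_singleton] at hy'; subst hy'; exact hpm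
      obtain ⟨c1, c2, c3⟩ := ih P (Q ++ [p]) m hP h2
      exact ⟨c1, c2, by rw [c3]; simp⟩

-- B's extraction names the head and tail of A's sorted waiting list
lemma pvExtract_sortK (x : Int × Int × Int) (xs : List (Int × Int × Int)) :
    pvSortK (x :: xs) = (pvExtractB x xs).1 :: pvSortK (pvExtractB x xs).2 := by
  obtain ⟨c1, c2, c3⟩ := pvSel_inv xs [] [] x (by simp) (by simp)
  simp only [pvExtractB]
  calc pvSortK (x :: xs)
      = pvSortK ((xs.foldl pvStepB ([], x, [])).1 ++ (xs.foldl pvStepB ([], x, [])).2.1 ::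
          (xs.foldl pvStepB ([], x, [])).2.2) := by rw [c3]; simp
    _ = _ := pvPop_sortK _ _ _ c1 c2

-- the two arrival loops stay in lockstep: same stopping index / rest of pending,
-- and waiting lists equal after sorting
lemma pvAdd_rel (arr : List (Int × Int × Int)) (time : Int) :
    ∀ (k i : Nat) (wA wB : List (Int × Int × Int)),
      arr.length - i ≤ k → i ≤ arr.length → pvSortK wA = pvSortK wB →
      arr.drop (pvAddA arr time k i wA).1 = (pvAddB time (arr.drop i) wB).1 ∧
      (pvAddA arr time k i wA).1 ≤ arr.length ∧
      pvSortK (pvAddA arr time k i wA).2 = pvSortK (pvAddB time (arr.drop i) wB).2 := by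
  intro k
  induction k with
  | zero =>
    intro i wA wB hk hi hw
    have : i = arr.length := by omega
    subst this
    simp [pvAddA, pvAddB, hw]
  | succ k ih =>
    intro i wA wB hk hi hw
    by_cases hlt : i < arr.length
    · have hdrop : arr.drop i = arr[i] :: arr.drop (i + 1) := List.drop_eq_getElem_cons hlt
      rw [hdrop]
      simp only [pvAddA, hlt, dite_true, pvAddB]
      by_cases hle : (arr[i]'hlt).1 ≤ time
      · simp only [hle, if_true]
        exact ih (i + 1) _ _ (by omega) (by omega)
          (pvSortK_congr_append [((arr[i]'hlt).2.2, (arr[i]'hlt).1, (arr[i]'hlt).2.1)] hw)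
      · simp only [hle, if_false]
        exact ⟨by rw [hdrop], by omega, hw⟩
    · simp only [pvAddA, hlt, dite_false]
      have hnil : arr.drop i = [] := List.drop_eq_nil_of_le (by omega)
      rw [hnil]
      simp only [pvAddB]
      exact ⟨trivial, hi, hw⟩

-- the two outer loops in lockstep
lemma pvLoop_rel (arr : List (Int × Int × Int)) (t : Int) :
    ∀ (f : Nat) (i : Nat) (time : Int) (wA wB : List (Int × Int × Int))
      (res : PySem.Dict Int Int),
      i ≤ arr.length → pvSortK wA = pvSortK wB →
      pvLoopA arr t f i time wA res = pvLoopB t f (arr.drop i) time wB res := by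
  intro f
  induction f with
  | zero => intro i time wA wB res _ _; rfl
  | succ f ih =>
    intro i time wA wB res hi hw
    have hlenw : wA.length = wB.length := by
      rw [← pvSortK_length wA, ← pvSortK_length wB, hw]
    have hcondAB : (i < arr.length ∨ wA ≠ []) ↔ (arr.drop i ≠ [] ∨ wB ≠ []) := by
      constructor
      · rintro (h | h)
        · exact Or.inl (by simp [List.drop_eq_nil_iff]; omega)
        · refine Or.inr ?_
          intro hB; apply h
          rw [← List.length_eq_zero_iff] at *; omega
      · rintro (h | h)
        · simp [List.drop_eq_nil_iff] at h; exact Or.inl (by omega)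
        · refine Or.inr ?_
          intro hA; apply h
          rw [← List.length_eq_zero_iff] at *; omega
    by_cases hcond : i < arr.length ∨ wA ≠ []
    · rw [pvLoopA, pvLoopB, if_pos hcond, if_pos (hcondAB.mp hcond)]
      obtain ⟨e1, e2, e3⟩ :=
        pvAdd_rel arr time (arr.length - i) i wA wB (by omega) hi hw
      simp only [pvSorted2_eq]
      cases hB2 : (pvAddB time (arr.drop i) wB).2 with
      | nil =>
        rw [hB2] at e3
        have hA2 : (pvAddA arr time (arr.length - i) i wA).2 = [] := by
          rw [← List.length_eq_zero_iff, ← pvSortK_length, e3]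
          rfl
        simp only [hA2, show pvSortK ([] : List (Int × Int × Int)) = [] from rfl]
        cases hq1 : (pvAddB time (arr.drop i) wB).1 with
        | nil =>
          have hnone : arr[(pvAddA arr time (arr.length - i) i wA).1]? = none := by
            rw [← List.head?_drop, e1, hq1]; rfl
          simp only [hnone]
        | cons a rest =>
          have hsome : arr[(pvAddA arr time (arr.length - i) i wA).1]? = some a := by
            rw [← List.head?_drop, e1, hq1]; rfl
          simp only [hsome]
          have := ih (pvAddA arr time (arr.length - i) i wA).1 a.1 [] [] res e2 rfl
          rw [e1, hq1] at this
          exact this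
      | cons x xs =>
        rw [hB2] at e3
        rcases hE : pvExtractB x xs with ⟨⟨s1, s2, s3⟩, r⟩
        have hx : pvSortK (x :: xs) = (s1, s2, s3) :: pvSortK r := by
          have h' := pvExtract_sortK x xs
          rw [hE] at h'
          exact h'
        simp only [hE, e3, hx]
        have := ih (pvAddA arr time (arr.length - i) i wA).1 (time + t)
          (pvSortK r) r (res.insert s3 time) e2 (pvSortK_idem r)
        rw [e1] at this
        exact this
    · rw [pvLoopA, pvLoopB, if_neg hcond, if_neg (fun h => hcond (hcondAB.mpr h))]

-- ===== VERDICT (by name: the statement is the Claim_ definition above) =====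
theorem simulate_patients_spec : Claim_equal_simulate_patients := by
  intro arrivals t _
  unfold Spec_simulate_patients simulate_patients simulate_patients_alt
  have h := pvLoop_rel (PySem.List.sorted arrivals (fun x => x.1)) t
    (2 * (PySem.List.sorted arrivals (fun x => x.1)).length + 1) 0 0 [] [] PySem.Dict.empty
    (by omega) rfl
  simpa using congrArg PySem.Dict.items h
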